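-- pv_equiv track=rewrite | github.com/Israwss/lexer_back | analizador.py | automataPalabra
-- ===== SOURCE A (Python) =====
-- Estadospalabra = [[1,2,2],[1,1,2]] #Tabla de transicion para formar palabras con numeros: Letra/ Numero / otro (error)
--
-- def automataPalabra(x, i):  # Se mantiene igual
--     estado, pala = 0, ""
--     resultados = []
--     contador = 0
--     while (estado != 2 and i <= len(x) - 1):
--         if (x[i].isalpha()):
--             pala = pala + x[i]
--             estado = Estadospalabra[estado][0]
--         elif (x[i].isdigit()):
--             pala = pala + x[i]
--             estado = Estadospalabra[estado][1]
--         else: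
--             estado = Estadospalabra[estado][2]
--         i = i + 1
--     contador += 1
--     return i - 1, pala, resultados, contador
-- ===== SOURCE B (Python) =====
-- def automataPalabra(x, i):
--     pala = ""
--     if i <= len(x) - 1:
--         c = x[i]
--         if c.isalpha():
--             pala = c
--             i += 1
--             while i <= len(x) - 1 and (x[i].isalpha() or x[i].isdigit()):
--                 pala += x[i]
--                 i += 1
--             if i <= len(x) - 1:  # stopped on a terminator char: consume it
--                 i += 1
--         elif c.isdigit():
--             pala = c
--             i += 1
--         else:
--             i += 1
--     return i - 1, pala, [], 1
-- ===== Notes on version B (the rewrite author's own statement) =====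
-- stated objective: simpler
-- what changed: Dropped the DFA transition table and estado variable: B inspects the first character directly and uses a single while loop to consume the alphanumeric tail of a word, with the terminator-consumption and digit-first cases as explicit branches.
import Mathlib
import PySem

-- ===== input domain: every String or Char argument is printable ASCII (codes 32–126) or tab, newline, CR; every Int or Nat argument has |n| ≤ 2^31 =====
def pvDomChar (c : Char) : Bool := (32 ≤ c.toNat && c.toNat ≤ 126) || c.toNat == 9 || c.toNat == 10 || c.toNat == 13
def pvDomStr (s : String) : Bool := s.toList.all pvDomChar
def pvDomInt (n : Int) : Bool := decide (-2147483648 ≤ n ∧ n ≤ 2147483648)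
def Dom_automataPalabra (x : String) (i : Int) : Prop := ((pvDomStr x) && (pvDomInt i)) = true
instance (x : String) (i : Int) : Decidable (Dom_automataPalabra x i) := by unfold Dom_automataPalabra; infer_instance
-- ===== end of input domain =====

-- B drops A's transition table/state variable for direct branches over the first character
-- and one while loop over the word tail (objective: simpler; same return value everywhere A returns).

-- ===== PORT A =====
def Estadospalabra : List (List Int) := [[1, 2, 2], [1, 1, 2]]

-- A's while loop over (estado, pala, i); on an invalid index (Python IndexError, outside Pre_) it stops.
def automataPalabraLoop (cs : List Char) (estado : Int) (pala : List Char) (i : Int) :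
    Int × List Char :=
  if h : estado ≠ 2 ∧ i ≤ (cs.length : Int) - 1 then
    match PySem.List.pyGet? cs i with
    | none => (i, pala)  -- Python raises IndexError here; excluded by Pre_
    | some c =>
      if PySem.Chars.isalpha c then
        automataPalabraLoop cs (PySem.List.pyGetD (PySem.List.pyGetD Estadospalabra estado []) 0 2)
          (pala ++ [c]) (i + 1)
      else if PySem.Chars.isdigit c then
        automataPalabraLoop cs (PySem.List.pyGetD (PySem.List.pyGetD Estadospalabra estado []) 1 2)
          (pala ++ [c]) (i + 1)
      else
        automataPalabraLoop cs (PySem.List.pyGetD (PySem.List.pyGetD Estadospalabra estado []) 2 2)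
          pala (i + 1)
  else (i, pala)
termination_by ((cs.length : Int) - i).toNat
decreasing_by all_goals omega

def automataPalabra (x : String) (i : Int) : Int × String × List String × Int :=
  let r := automataPalabraLoop x.toList 0 [] i
  (r.1 - 1, String.ofList r.2, [], 0 + 1)

-- ===== PORT B =====
-- B's while loop: consume consecutive alpha/digit characters.
def automataPalabraAltScan (cs : List Char) (pala : List Char) (i : Int) : Int × List Char :=
  if h : i ≤ (cs.length : Int) - 1 then
    match PySem.List.pyGet? cs i with
    | none => (i, pala)  -- Python raises IndexError here; excluded by Pre_
    | some c =>
      if PySem.Chars.isalpha c || PySem.Chars.isdigit c then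
        automataPalabraAltScan cs (pala ++ [c]) (i + 1)
      else (i, pala)
  else (i, pala)
termination_by ((cs.length : Int) - i).toNat
decreasing_by omega

def automataPalabra_alt (x : String) (i : Int) : Int × String × List String × Int :=
  let cs := x.toList
  if i ≤ (cs.length : Int) - 1 then
    match PySem.List.pyGet? cs i with
    | none => (i - 1, "", [], 1)  -- Python raises IndexError here; excluded by Pre_
    | some c =>
      if PySem.Chars.isalpha c then
        let r := automataPalabraAltScan cs [c] (i + 1)
        let j := if r.1 ≤ (cs.length : Int) - 1 then r.1 + 1 else r.1
        (j - 1, String.ofList r.2, [], 1)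
      else if PySem.Chars.isdigit c then
        (i + 1 - 1, String.ofList [c], [], 1)
      else
        (i + 1 - 1, "", [], 1)
  else (i - 1, "", [], 1)

-- ===== PRECONDITION & SPEC =====
-- Pre_ excludes exactly the inputs where Python A raises IndexError: i below -len(x)
-- while the loop condition i <= len(x)-1 still admits an access.
def Pre_automataPalabra (x : String) (i : Int) : Prop :=
  -(x.toList.length : Int) ≤ i ∨ (x.toList.length : Int) ≤ i
instance (x : String) (i : Int) : Decidable (Pre_automataPalabra x i) := by
  unfold Pre_automataPalabra; infer_instance

def pvWitness_automataPalabra : String × Int := ("ab1 c", 0)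

def Spec_automataPalabra (x : String) (i : Int) (out : Int × String × List String × Int) : Prop :=
  out = automataPalabra_alt x i
instance (x : String) (i : Int) (out : Int × String × List String × Int) :
    Decidable (Spec_automataPalabra x i out) := by unfold Spec_automataPalabra; infer_instance

-- ===== CLAIM (what is proved, stated in full; the proofs are below) =====
def Claim_equal_automataPalabra : Prop := ∀ (x : String) (i : Int), Dom_automataPalabra x i →
  Pre_automataPalabra x i → Spec_automataPalabra x i (automataPalabra x i)

-- ===== LEMMAS AND PROOFS =====

lemma pvGetSome (cs : List Char) (i : Int) (hlo : -(cs.length : Int) ≤ i)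
    (hhi : i ≤ (cs.length : Int) - 1) : ∃ c, PySem.List.pyGet? cs i = some c := by
  cases hc : PySem.List.pyGet? cs i with
  | some c => exact ⟨c, rfl⟩
  | none =>
    rw [PySem.List.pyGet?_eq_none_iff] at hc
    exact absurd ⟨by omega, by omega⟩ hc

-- In estado 2 A's loop exits immediately.
lemma loop2 (cs : List Char) (pala : List Char) (i : Int) :
    automataPalabraLoop cs 2 pala i = (i, pala) := by
  rw [automataPalabraLoop]; simp

-- A's loop from estado = 1 equals B's scan plus one extra step consuming the terminator.
lemma loop1_eq (cs : List Char) : ∀ (n : Nat) (i : Int) (pala : List Char),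
    ((cs.length : Int) - i).toNat = n → -(cs.length : Int) ≤ i →
    automataPalabraLoop cs 1 pala i =
      (let r := automataPalabraAltScan cs pala i
       if r.1 ≤ (cs.length : Int) - 1 then (r.1 + 1, r.2) else r) := by
  intro n
  induction n with
  | zero =>
    intro i pala hn hlo
    have hhi : ¬ i ≤ (cs.length : Int) - 1 := by omega
    rw [automataPalabraLoop, automataPalabraAltScan]
    simp [hhi]
  | succ m ih =>
    intro i pala hn hlo
    by_cases hhi : i ≤ (cs.length : Int) - 1
    · obtain ⟨c, hc⟩ := pvGetSome cs i hlo hhi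
      rw [automataPalabraLoop, automataPalabraAltScan]
      simp only [hhi, and_true, dif_pos, ne_eq, hc]
      have ht0 : PySem.List.pyGetD (PySem.List.pyGetD Estadospalabra 1 []) 0 2 = 1 := by decide
      have ht1 : PySem.List.pyGetD (PySem.List.pyGetD Estadospalabra 1 []) 1 2 = 1 := by decide
      have ht2 : PySem.List.pyGetD (PySem.List.pyGetD Estadospalabra 1 []) 2 2 = 2 := by decide
      by_cases ha : PySem.Chars.isalpha c = true
      · simp only [ha, if_pos, Bool.true_or, ht0, if_true]
        have := ih (i + 1) (pala ++ [c]) (by omega) (by omega)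
        simpa using this
      · by_cases hd : PySem.Chars.isdigit c = true
        · simp only [ha, hd, Bool.false_or, if_false, if_true, ht1]
          have := ih (i + 1) (pala ++ [c]) (by omega) (by omega)
          simpa using this
        · simp [ha, hd, ht2, loop2, hhi]
    · rw [automataPalabraLoop, automataPalabraAltScan]
      simp [hhi]

-- ===== VERDICT (by name: the statement is the Claim_ definition above) =====
theorem automataPalabra_spec : Claim_equal_automataPalabra := by
  intro x i _hdom hpre
  unfold Spec_automataPalabra automataPalabra automataPalabra_alt
  set cs := x.toList with hcs
  by_cases hhi : i ≤ (cs.length : Int) - 1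
  · have hlo : -(cs.length : Int) ≤ i := by
      rcases hpre with h | h
      · exact h
      · omega
    obtain ⟨c, hc⟩ := pvGetSome cs i hlo hhi
    rw [automataPalabraLoop]
    simp only [hhi, and_true, ne_eq, dif_pos, hc]
    have ht0 : PySem.List.pyGetD (PySem.List.pyGetD Estadospalabra 0 []) 0 2 = 1 := by decide
    have ht1 : PySem.List.pyGetD (PySem.List.pyGetD Estadospalabra 0 []) 1 2 = 2 := by decide
    have ht2 : PySem.List.pyGetD (PySem.List.pyGetD Estadospalabra 0 []) 2 2 = 2 := by decide
    by_cases ha : PySem.Chars.isalpha c = true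
    · have hrec := loop1_eq cs (((cs.length : Int) - (i + 1)).toNat) (i + 1) [c] rfl (by omega)
      simp only [ha, if_true, ht0, List.nil_append]
      simp [hrec]
      split <;> simp
    · by_cases hd : PySem.Chars.isdigit c = true
      · simp only [ha, hd, if_false, if_true, ht1]
        simp [loop2]
      · simp only [ha, hd, if_false, ht2]
        simp [loop2]
  · rw [automataPalabraLoop]
    simp [hhi]
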